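-- pv_equiv track=rewrite | github.com/kunglab/idp | approx/coeffs_generator.py | step
-- ===== SOURCE A (Python) =====
-- def step(n,steps):
--     num = len(steps)
--     i = 0
--     coeffs = []
--     for step in steps:
--         coeffs.extend([step for j in range(n//num+1)])
--         i = i + 1
--     return coeffs[:n]
-- ===== SOURCE B (Python) =====
-- def step(n, steps):
--     if not steps:
--         return []
--     block = n // len(steps) + 1
--     return [steps[i // block] for i in range(n)]
-- ===== Notes on version B (the rewrite author's own statement) =====
-- stated objective: faster
-- what changed: B maps each output index i directly to steps[i // block] in one comprehension over range(n), instead of extending a growing list block-by-block per step and truncating with [:n].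
import Mathlib
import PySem

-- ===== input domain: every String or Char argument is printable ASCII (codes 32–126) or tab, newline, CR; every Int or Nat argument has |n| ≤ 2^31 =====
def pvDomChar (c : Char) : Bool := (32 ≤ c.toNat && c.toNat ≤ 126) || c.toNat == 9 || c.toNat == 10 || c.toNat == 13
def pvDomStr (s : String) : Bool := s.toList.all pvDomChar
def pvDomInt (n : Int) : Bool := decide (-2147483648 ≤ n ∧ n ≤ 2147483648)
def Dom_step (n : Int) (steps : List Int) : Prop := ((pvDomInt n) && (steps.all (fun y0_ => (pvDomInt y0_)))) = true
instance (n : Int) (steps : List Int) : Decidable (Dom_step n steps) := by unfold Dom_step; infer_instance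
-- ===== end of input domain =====

-- B builds the result output-index-driven ([steps[i // block] for i in range(n)]) instead of
-- extending a list block-by-block per step and truncating; objective: simpler.

-- ===== PORT A =====
-- literal port: fold carries (coeffs, i) exactly as A does (i is written but never read)
def step (n : Int) (steps : List Int) : List Int :=
  let num : Int := steps.length
  let st := steps.foldl
    (fun (st : List Int × Int) s =>
      (st.1 ++ (PySem.List.pyRange 0 (PySem.Int.floordiv n num + 1) 1).map (fun _ => s),
       st.2 + 1))
    ([], 0)
  PySem.List.slice st.1 none (some n)

-- ===== PORT B =====
def step_alt (n : Int) (steps : List Int) : List Int :=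
  if steps = [] then []
  else
    let block : Int := PySem.Int.floordiv n (steps.length : Int) + 1
    -- steps[i // block]: always in range here, so pyGetD with default 0 is exact
    (PySem.List.pyRange 0 n 1).map (fun i => PySem.List.pyGetD steps (PySem.Int.floordiv i block) 0)

-- ===== PRECONDITION & SPEC =====
def Spec_step (n : Int) (steps : List Int) (out : List Int) : Prop := out = step_alt n steps
instance (n : Int) (steps : List Int) (out : List Int) : Decidable (Spec_step n steps out) := by unfold Spec_step; infer_instance

-- ===== CLAIM (what is proved, stated in full; the proofs are below) =====
def Claim_equal_step : Prop := ∀ (n : Int) (steps : List Int), Dom_step n steps → Spec_step n steps (step n steps)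

-- ===== LEMMAS AND PROOFS =====

-- the pair-fold of the A port is a flatMap on its first component
theorem step_fold_fst (f : Int → List Int) :
    ∀ (xs : List Int) (acc : List Int) (i : Int),
      (xs.foldl (fun (st : List Int × Int) s => (st.1 ++ f s, st.2 + 1)) (acc, i)).1
        = acc ++ xs.flatMap f := by
  intro xs
  induction xs with
  | nil => intro acc i; simp
  | cons s ss ih => intro acc i; simp [List.foldl_cons, ih, List.flatMap_cons]

theorem replicate_of_map_pyRange (b : Int) (s : Int) :
    (PySem.List.pyRange 0 b 1).map (fun _ => s) = List.replicate b.toNat s := by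
  rw [PySem.List.pyRange_one]
  simp [List.map_map, Function.comp, List.eq_replicate_iff]

-- core combinatorial fact, stated over Nat
theorem take_flatMap_replicate :
    ∀ (steps : List Int) (B N : Nat), 1 ≤ B → N ≤ steps.length * B →
      (steps.flatMap (fun s => List.replicate B s)).take N
        = (List.range N).map (fun k => steps.getD (k / B) 0) := by
  intro steps
  induction steps with
  | nil =>
    intro B N _ hN
    simp at hN
    simp [hN]
  | cons s ss ih =>
    intro B N hB hN
    rw [List.flatMap_cons]
    by_cases h : N ≤ B
    · rw [List.take_append_of_le_length (by simp [h]), List.take_replicate, min_eq_left h]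
      have : (List.range N).map (fun k => (s :: ss).getD (k / B) 0)
          = (List.range N).map (fun _ => s) := by
        apply List.map_congr_left
        intro k hk
        rw [List.mem_range] at hk
        rw [Nat.div_eq_of_lt (lt_of_lt_of_le hk h)]
        simp
      rw [this, List.map_const', List.length_range]
    · rw [not_le] at h
      have hsplit : N = B + (N - B) := by omega
      rw [List.take_append, List.length_replicate,
          List.take_replicate, min_eq_right (le_of_lt h),
          ih B (N - B) hB (by simp [Nat.add_mul] at hN; omega)]
      conv_rhs => rw [hsplit, List.range_add]
      rw [List.map_append, List.map_map]
      congr 1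
      · have : (List.range B).map (fun k => (s :: ss).getD (k / B) 0)
            = (List.range B).map (fun _ => s) := by
          apply List.map_congr_left
          intro k hk
          rw [List.mem_range] at hk
          rw [Nat.div_eq_of_lt hk]
          simp
        rw [this, List.map_const', List.length_range]
      · apply List.map_congr_left
        intro k _
        simp only [Function.comp_apply]
        rw [Nat.add_div_left _ (by omega)]
        simp

theorem slice_nil_to (n : Int) : PySem.List.slice ([] : List Int) none (some n) = [] := by
  simp [PySem.List.slice]

-- ===== VERDICT (by name: the statement is the Claim_ definition above) =====
theorem step_spec : Claim_equal_step := by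
  intro n steps _
  unfold Spec_step step step_alt
  cases steps with
  | nil => simp [slice_nil_to]
  | cons s0 ss =>
    set stps := s0 :: ss with hst
    have hne : stps ≠ [] := by simp [hst]
    simp only [if_neg hne]
    set L : Int := (stps.length : Int) with hL
    have hLpos : (0 : Int) < L := by simp [hL, hst]
    set b : Int := PySem.Int.floordiv n L + 1 with hb
    rw [step_fold_fst]
    simp only [List.nil_append]
    have hrep : stps.flatMap (fun s => (PySem.List.pyRange 0 b 1).map (fun _ => s))
        = stps.flatMap (fun s => List.replicate b.toNat s) := by
      exact List.flatMap_congr (fun s _ => replicate_of_map_pyRange b s)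
    rw [hrep]
    by_cases hn : n ≤ 0
    · -- n ≤ 0: b ≤ 0 unless n = 0 (then slice to 0 is []); RHS range empty
      rw [PySem.List.pyRange_one_eq_nil hn]
      rcases lt_or_eq_of_le hn with hlt | heq
      · have hbnp : b ≤ 0 := by
          have := PySem.Int.floordiv_lt_iff_lt_mul (a := n) (b := L) (q := 0) hLpos
          have hfd : PySem.Int.floordiv n L < 0 := this.mpr (by omega)
          omega
        have hb0 : b.toNat = 0 := by omega
        simp [hb0, PySem.List.slice]
      · subst heq
        rw [PySem.List.slice_to _ (le_refl (0:Int))]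
        simp
    · rw [not_le] at hn
      rw [PySem.List.slice_to _ (le_of_lt hn)]
      have hfd : PySem.Int.floordiv n L = n / L := PySem.Int.floordiv_eq_ediv_of_pos hLpos
      have hbpos : (0 : Int) < b := by
        rw [hb, hfd]
        have := Int.ediv_nonneg (le_of_lt hn) (le_of_lt hLpos)
        omega
      have hbound : n ≤ L * b := by
        have h2 : n % L < L := Int.emod_lt_of_pos n hLpos
        have h3 : n % L = n - L * (n / L) := Int.emod_def n L
        rw [hb, hfd, mul_add, mul_one]
        linarith
      have hNat : n.toNat ≤ stps.length * b.toNat := by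
        have : (n.toNat : Int) ≤ (stps.length : Int) * (b.toNat : Int) := by
          rw [Int.toNat_of_nonneg (le_of_lt hn), Int.toNat_of_nonneg (le_of_lt hbpos)]
          exact hL ▸ hbound
        exact_mod_cast this
      rw [take_flatMap_replicate stps b.toNat n.toNat (by omega) hNat]
      rw [PySem.List.pyRange_one]
      simp only [sub_zero, List.map_map]
      apply List.map_congr_left
      intro k hk
      rw [List.mem_range] at hk
      simp only [Function.comp, zero_add]
      have hbcast : ((b.toNat : Int)) = b := Int.toNat_of_nonneg (le_of_lt hbpos)
      rw [← hbcast, PySem.Int.floordiv_natCast, PySem.List.pyGetD_natCast,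
          Int.toNat_natCast]
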